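-- pv_equiv track=rewrite | github.com/cliffxuan/nvim-config | lua/vibe-coding/python_impl/fix_diff.py | _add_missing_empty_line_additions
-- ===== SOURCE A (Python) =====
-- def _add_missing_empty_line_additions(lines: list[str]) -> list[str]:
--     """Add missing empty line additions before content additions following empty context lines.
--
--     This detects patterns like:
--     - Context line with content (e.g., ' fi')
--     - Context empty line (e.g., ' ')
--     - Addition with content (e.g., '+# New line')
--
--     And converts the empty context to an empty addition, then adds the content addition.
--     """
--     if not lines:
--         return lines
--
--     result = []
--     i = 0
--
--     while i < len(lines):
--         current_line = lines[i]
--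
--         # Look for the pattern: content context -> empty context -> content addition
--         if i + 2 < len(lines):
--             line1 = current_line
--             line2 = lines[i + 1]
--             line3 = lines[i + 2]
--
--             # Pattern: context with content -> empty context -> content addition
--             pattern_match = (
--                 line1.startswith(" ")
--                 and line1.strip()  # Context with content
--                 and (line2.startswith(" ") or line2 == "")
--                 and not line2.strip()  # Empty context (with or without prefix)
--                 and line3.startswith("+")
--                 and line3.strip()
--             )  # Content addition
--
--             if pattern_match:
--                 # Add the content context line
--                 result.append(line1)
--
--                 # Convert the empty context line to an empty addition
--                 result.append("+")
--
--                 # Add the content addition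
--                 result.append(line3)
--
--                 # Skip all three lines since we processed them
--                 i += 3
--                 continue
--
--         result.append(current_line)
--         i += 1
--
--     return result
-- ===== SOURCE B (Python) =====
-- def _add_missing_empty_line_additions(lines: list[str]) -> list[str]:
--     """Two-pass rewrite: collect all indices where the three-line pattern
--     matches (matches can never overlap), then stitch the output together
--     from the unmatched slices and the rewritten triples."""
--     if not lines:
--         return lines
--
--     def hit(a, b, c):
--         return bool(
--             a.startswith(" ") and a.strip()
--             and (b.startswith(" ") or b == "") and not b.strip()
--             and c.startswith("+") and c.strip()
--         )
--
--     marks = [i for i in range(len(lines) - 2)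
--              if hit(lines[i], lines[i + 1], lines[i + 2])]
--
--     out = []
--     prev = 0
--     for i in marks:
--         out += lines[prev:i]
--         out.append(lines[i])
--         out.append("+")
--         out.append(lines[i + 2])
--         prev = i + 3
--     out += lines[prev:]
--     return out
-- ===== Notes on version B (the rewrite author's own statement) =====
-- stated objective: alternative
-- what changed: Replaced the greedy index-skipping state machine with a two-pass design: first collect every index where the three-line window matches (matches provably cannot overlap), then stitch the output from the unmatched slices plus the rewritten triples.
import Mathlib
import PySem

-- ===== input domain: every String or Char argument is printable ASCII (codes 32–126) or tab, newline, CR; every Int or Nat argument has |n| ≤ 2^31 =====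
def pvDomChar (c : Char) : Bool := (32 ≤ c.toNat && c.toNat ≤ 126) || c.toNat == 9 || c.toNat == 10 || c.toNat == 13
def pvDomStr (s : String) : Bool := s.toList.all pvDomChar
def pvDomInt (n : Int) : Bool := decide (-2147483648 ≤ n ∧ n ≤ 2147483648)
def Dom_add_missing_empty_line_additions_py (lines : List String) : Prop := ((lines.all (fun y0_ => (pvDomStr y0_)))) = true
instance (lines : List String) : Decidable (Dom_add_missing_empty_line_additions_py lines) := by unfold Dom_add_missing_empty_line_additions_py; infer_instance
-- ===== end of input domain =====

-- B replaces A's greedy index-skipping loop by a mark-then-stitch two-pass rewrite (same cost, different decomposition).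

-- ===== PORT A =====
-- A's while-loop: index i, result accumulator; pattern branch skips 3, otherwise copy 1.
def pvALoop (lines : List String) (i : Nat) (acc : List String) : List String :=
  if _h : i < lines.length then
    let current := lines.getD i ""
    if i + 2 < lines.length then
      let l1 := current
      let l2 := lines.getD (i + 1) ""
      let l3 := lines.getD (i + 2) ""
      if PySem.Str.startswith l1 " " && !(PySem.Str.strip l1 == "")
          && (PySem.Str.startswith l2 " " || l2 == "") && (PySem.Str.strip l2 == "")
          && PySem.Str.startswith l3 "+" && !(PySem.Str.strip l3 == "") then
        pvALoop lines (i + 3) (acc ++ [l1] ++ ["+"] ++ [l3])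
      else
        pvALoop lines (i + 1) (acc ++ [current])
    else
      pvALoop lines (i + 1) (acc ++ [current])
  else acc
termination_by lines.length - i

def add_missing_empty_line_additions_py (lines : List String) : List String :=
  if lines = [] then lines else pvALoop lines 0 []

-- ===== PORT B =====
-- the three-line pattern test (Source B's `hit`)
def pvHit (a b c : String) : Bool :=
  PySem.Str.startswith a " " && !(PySem.Str.strip a == "")
    && (PySem.Str.startswith b " " || b == "") && (PySem.Str.strip b == "")
    && PySem.Str.startswith c "+" && !(PySem.Str.strip c == "")

def pvMarks (lines : List String) : List Nat :=
  (List.range (lines.length - 2)).filter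
    (fun i => pvHit (lines.getD i "") (lines.getD (i + 1) "") (lines.getD (i + 2) ""))

def pvStitch (lines : List String) (st : List String × Nat) (i : Nat) : List String × Nat :=
  (st.1 ++ PySem.List.slice lines (some (st.2 : Int)) (some (i : Int))
        ++ [lines.getD i "", "+", lines.getD (i + 2) ""], i + 3)

def add_missing_empty_line_additions_py_alt (lines : List String) : List String :=
  if lines = [] then lines
  else
    let res := (pvMarks lines).foldl (pvStitch lines) ([], 0)
    res.1 ++ PySem.List.slice lines (some (res.2 : Int)) none

-- ===== PRECONDITION & SPEC =====
def Spec_add_missing_empty_line_additions_py (lines : List String) (out : List String) : Prop := out = add_missing_empty_line_additions_py_alt lines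
instance (lines : List String) (out : List String) : Decidable (Spec_add_missing_empty_line_additions_py lines out) := by unfold Spec_add_missing_empty_line_additions_py; infer_instance

-- ===== CLAIM (what is proved, stated in full; the proofs are below) =====
def Claim_equal_add_missing_empty_line_additions_py : Prop := ∀ (lines : List String), Dom_add_missing_empty_line_additions_py lines → Spec_add_missing_empty_line_additions_py lines (add_missing_empty_line_additions_py lines)

-- ===== LEMMAS AND PROOFS =====

-- hit at position i of lines
def pvHitAt (lines : List String) (i : Nat) : Bool :=
  pvHit (lines.getD i "") (lines.getD (i + 1) "") (lines.getD (i + 2) "")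

-- marks at and after p
def pvM (lines : List String) (p : Nat) : List Nat :=
  (pvMarks lines).filter (fun i => decide (p ≤ i))

-- recursive description of B's stitch pass
def pvBuild (lines : List String) : List Nat → Nat → List String
  | [], prev => lines.drop prev
  | i :: ms, prev =>
      (lines.drop prev).take (i - prev)
        ++ lines.getD i "" :: "+" :: lines.getD (i + 2) "" :: pvBuild lines ms (i + 3)

theorem pvHit_not_overlap1 {a b c d : String} (h : pvHit a b c = true) : pvHit b c d = false := by
  have hb : PySem.Str.strip b = "" := by
    unfold pvHit at h
    simp only [Bool.and_eq_true, beq_iff_eq] at h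
    exact h.1.1.2
  simp [pvHit, hb]

theorem pvHit_not_overlap2 {a b c d e : String} (h : pvHit a b c = true) : pvHit c d e = false := by
  have h1 : PySem.Str.startswith c "+" = true := by
    unfold pvHit at h
    simp only [Bool.and_eq_true] at h
    exact h.1.2
  have hsp : PySem.Str.startswith c " " = false := by
    by_contra hx
    simp only [Bool.not_eq_false] at hx
    rw [PySem.Str.startswith_eq, PySem.Chars.startswith_iff] at h1 hx
    rcases h1 with ⟨t1, ht1⟩
    rcases hx with ⟨t2, ht2⟩
    have h3 := ht1.trans ht2.symm
    simp at h3
  simp only [PySem.Str.startswith_eq] at hsp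
  simp at hsp
  simp [pvHit, hsp]

theorem pvHitAt_not_overlap1 (lines : List String) (i : Nat) (h : pvHitAt lines i = true) :
    pvHitAt lines (i + 1) = false := by
  unfold pvHitAt at *
  have := pvHit_not_overlap1 (d := lines.getD (i + 3) "") h
  simpa [Nat.add_assoc] using this

theorem pvHitAt_not_overlap2 (lines : List String) (i : Nat) (h : pvHitAt lines i = true) :
    pvHitAt lines (i + 2) = false := by
  unfold pvHitAt at *
  have h2 := pvHit_not_overlap2 (d := lines.getD (i + 3) "") (e := lines.getD (i + 4) "") h
  simpa [Nat.add_assoc] using h2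

-- pvM p as a filtered suffix range
theorem pvMarks_eq (lines : List String) :
    pvMarks lines = (List.range (lines.length - 2)).filter (pvHitAt lines) := rfl

theorem pvM_eq_range' (lines : List String) (p : Nat) (hp : p ≤ lines.length - 2) :
    pvM lines p = (List.range' p (lines.length - 2 - p)).filter (pvHitAt lines) := by
  unfold pvM
  rw [pvMarks_eq, List.filter_filter]
  have hsplit : List.range (lines.length - 2) = List.range' 0 p ++ List.range' p (lines.length - 2 - p) := by
    rw [List.range_eq_range',
      show lines.length - 2 = p + (lines.length - 2 - p) from by omega,
      ← List.range'_append]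
    norm_num
  rw [hsplit, List.filter_append]
  have h1 : (List.range' 0 p).filter (fun i => decide (p ≤ i) && pvHitAt lines i) = [] := by
    rw [List.filter_eq_nil_iff]
    intro a ha
    have : a < p := by
      have := List.mem_range'_1.mp ha; omega
    simp [pvHitAt, Nat.not_le.mpr this]
  have h2 : (List.range' p (lines.length - 2 - p)).filter (fun i => decide (p ≤ i) && pvHitAt lines i)
      = (List.range' p (lines.length - 2 - p)).filter (pvHitAt lines) := by
    apply List.filter_congr
    intro a ha
    have : p ≤ a := by have := List.mem_range'_1.mp ha; omega
    simp [pvHitAt, this]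
  rw [h1, h2]
  rfl

theorem pvM_nil (lines : List String) (p : Nat) (hp : lines.length - 2 ≤ p) :
    pvM lines p = [] := by
  unfold pvM
  rw [pvMarks_eq, List.filter_filter, List.filter_eq_nil_iff]
  intro a ha
  have : a < lines.length - 2 := List.mem_range.mp ha
  simp [Nat.not_le.mpr (by omega : a < p)]

theorem pvM_step (lines : List String) (p : Nat) (hp : p < lines.length - 2) :
    pvM lines p = (if pvHitAt lines p then [p] else []) ++ pvM lines (p + 1) := by
  rw [pvM_eq_range' lines p (by omega), pvM_eq_range' lines (p + 1) (by omega)]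
  have : lines.length - 2 - p = (lines.length - 2 - (p + 1)) + 1 := by omega
  rw [this, List.range'_succ, List.filter_cons]
  by_cases h : pvHitAt lines p = true <;> simp [h]

-- members of pvM p are ≥ p
theorem pvM_ge (lines : List String) (p : Nat) {i : Nat} (hi : i ∈ pvM lines p) : p ≤ i := by
  unfold pvM at hi
  have := List.of_mem_filter hi
  simpa using this

-- B's foldl equals pvBuild
theorem pvFoldl_build (lines : List String) (ms : List Nat) (acc : List String) (p : Nat) :
    (ms.foldl (pvStitch lines) (acc, p)).1
      ++ PySem.List.slice lines (some ((ms.foldl (pvStitch lines) (acc, p)).2 : Int)) none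
    = acc ++ pvBuild lines ms p := by
  induction ms generalizing acc p with
  | nil => simp [pvBuild, PySem.List.slice_from_natCast]
  | cons i ms ih =>
      simp only [List.foldl_cons, pvBuild]
      rw [ih]
      simp [pvStitch, PySem.List.slice_natCast]

-- unmarked head peels off one line
theorem pvBuild_cons_line (lines : List String) (ms : List Nat) (p : Nat)
    (hp : p < lines.length) (hms : ∀ i ∈ ms, p + 1 ≤ i) :
    pvBuild lines ms p = lines.getD p "" :: pvBuild lines ms (p + 1) := by
  have hdrop : lines.drop p = lines.getD p "" :: lines.drop (p + 1) := by
    rw [List.getD_eq_getElem?_getD, List.getElem?_eq_getElem hp]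
    simp
  cases ms with
  | nil => simp [pvBuild, hdrop]
  | cons i ms =>
      have hi : p + 1 ≤ i := hms i (by simp)
      simp only [pvBuild]
      rw [hdrop]
      have : i - p = (i - (p + 1)) + 1 := by omega
      rw [this, List.take_succ_cons]
      simp

-- main invariant: A's loop from index p equals B's stitch of the remaining marks
theorem pvALoop_eq_build (lines : List String) (p : Nat) (acc : List String) :
    pvALoop lines p acc = acc ++ pvBuild lines (pvM lines p) p := by
  by_cases h : p < lines.length
  · rw [pvALoop]
    simp only [dif_pos h]
    by_cases h2 : p + 2 < lines.length
    · simp only [if_pos h2]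
      by_cases hhit : pvHitAt lines p = true
      · have hc : (PySem.Str.startswith (lines.getD p "") " "
            && !(PySem.Str.strip (lines.getD p "") == "")
            && (PySem.Str.startswith (lines.getD (p + 1) "") " " || (lines.getD (p + 1) "") == "")
            && (PySem.Str.strip (lines.getD (p + 1) "") == "")
            && PySem.Str.startswith (lines.getD (p + 2) "") "+"
            && !(PySem.Str.strip (lines.getD (p + 2) "") == "")) = true := hhit
        simp only [hc, if_pos]
        rw [pvALoop_eq_build lines (p + 3) (acc ++ [lines.getD p ""] ++ ["+"] ++ [lines.getD (p + 2) ""])]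
        have hM : pvM lines p = p :: pvM lines (p + 3) := by
          rw [pvM_step lines p (by omega), if_pos hhit]
          simp only [List.singleton_append, List.cons.injEq, true_and]
          by_cases h4 : p + 1 < lines.length - 2
          · rw [pvM_step lines (p + 1) h4,
              if_neg (by simp [pvHitAt_not_overlap1 lines p hhit])]
            simp only [List.nil_append, show p + 1 + 1 = p + 2 from rfl]
            by_cases h5 : p + 2 < lines.length - 2
            · rw [pvM_step lines (p + 2) h5,
                if_neg (by simp [pvHitAt_not_overlap2 lines p hhit])]
              simp only [List.nil_append, show p + 2 + 1 = p + 3 from rfl]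
            · rw [pvM_nil lines (p + 2) (by omega), pvM_nil lines (p + 3) (by omega)]
          · rw [pvM_nil lines (p + 1) (by omega), pvM_nil lines (p + 3) (by omega)]
        rw [hM]
        simp [pvBuild]
      · have hc : (PySem.Str.startswith (lines.getD p "") " "
            && !(PySem.Str.strip (lines.getD p "") == "")
            && (PySem.Str.startswith (lines.getD (p + 1) "") " " || (lines.getD (p + 1) "") == "")
            && (PySem.Str.strip (lines.getD (p + 1) "") == "")
            && PySem.Str.startswith (lines.getD (p + 2) "") "+"
            && !(PySem.Str.strip (lines.getD (p + 2) "") == "")) = false := by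
          simpa [pvHitAt, pvHit] using hhit
        simp only [hc, Bool.false_eq_true, ite_false]
        rw [pvALoop_eq_build lines (p + 1) (acc ++ [lines.getD p ""])]
        have hM : pvM lines p = pvM lines (p + 1) := by
          rw [pvM_step lines p (by omega), if_neg hhit]; simp
        rw [hM, pvBuild_cons_line lines (pvM lines (p + 1)) p h (fun i hi => pvM_ge lines (p + 1) hi)]
        simp
    · simp only [if_neg h2]
      rw [pvALoop_eq_build lines (p + 1) (acc ++ [lines.getD p ""])]
      have hM : pvM lines p = pvM lines (p + 1) := by
        rw [pvM_nil lines p (by omega), pvM_nil lines (p + 1) (by omega)]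
      rw [hM, pvBuild_cons_line lines (pvM lines (p + 1)) p h (fun i hi => pvM_ge lines (p + 1) hi)]
      simp
  · rw [pvALoop]
    simp only [dif_neg h]
    rw [pvM_nil lines p (by omega)]
    simp [pvBuild, List.drop_eq_nil_of_le (by omega : lines.length ≤ p)]
termination_by lines.length - p
decreasing_by all_goals omega

-- ===== VERDICT (by name: the statement is the Claim_ definition above) =====
theorem add_missing_empty_line_additions_py_spec : Claim_equal_add_missing_empty_line_additions_py := by
  intro lines _
  unfold Spec_add_missing_empty_line_additions_py add_missing_empty_line_additions_py add_missing_empty_line_additions_py_alt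
  by_cases h : lines = []
  · simp [h]
  · simp only [if_neg h]
    rw [pvALoop_eq_build lines 0 []]
    have : pvM lines 0 = pvMarks lines := by
      unfold pvM
      simp
    rw [← this]
    exact (pvFoldl_build lines (pvM lines 0) [] 0).symm
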